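-- pv_equiv track=rewrite | github.com/olsenw/LeetCodeExercises | Python3/maximum_number_of_points_with_cost.py | maxPoints_tle
-- ===== SOURCE A (Python) =====
-- from typing import List, Dict, Set, Optional
--
-- def maxPoints_tle(points: List[List[int]]) -> int:
--     m,n = len(points), len(points[0])
--     dp = [[0] * n for _ in range(m-1)]
--     dp.append(points[-1])
--     for i in range(m-2,-1,-1):
--         for j in range(n):
--             for k in range(n):
--                 dp[i][j] = max(dp[i][j], points[i][j] + dp[i+1][k] - abs(j - k))
--     return max(dp[0])
-- ===== SOURCE B (Python) =====
-- def maxPoints_tle(points):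
--     n = len(points[0])
--     cur = points[-1][:n]
--     for row in reversed(points[:-1]):
--         left = cur[:]
--         for j in range(1, n):
--             left[j] = max(left[j - 1] - 1, cur[j])
--         right = cur[:]
--         for j in range(n - 2, -1, -1):
--             right[j] = max(right[j + 1] - 1, cur[j])
--         cur = [max(0, row[j] + max(left[j], right[j])) for j in range(n)]
--     return max(cur)
-- ===== Notes on version B (the rewrite author's own statement) =====
-- stated objective: faster
-- what changed: Replaces the O(n^2) inner scan over source columns by two linear prefix-max passes (left-to-right and right-to-left) that decompose the |j-k| penalty, giving O(m*n) instead of O(m*n^2).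
import Mathlib
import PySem

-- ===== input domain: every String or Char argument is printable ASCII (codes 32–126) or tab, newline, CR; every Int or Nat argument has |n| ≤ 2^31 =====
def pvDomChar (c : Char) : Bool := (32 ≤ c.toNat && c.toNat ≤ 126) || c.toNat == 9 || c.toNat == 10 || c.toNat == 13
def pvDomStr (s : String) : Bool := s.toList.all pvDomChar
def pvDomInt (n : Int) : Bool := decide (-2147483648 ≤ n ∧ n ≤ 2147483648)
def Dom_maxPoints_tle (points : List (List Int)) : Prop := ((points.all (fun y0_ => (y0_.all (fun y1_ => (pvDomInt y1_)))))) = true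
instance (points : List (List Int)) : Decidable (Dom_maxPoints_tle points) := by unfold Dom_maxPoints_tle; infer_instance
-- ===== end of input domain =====

-- B replaces A's O(n^2) inner column scan by two linear prefix-max passes decomposing the |j-k| penalty (asymptotically faster in a timing run).

-- ===== PORT A =====
-- one finished dp row: dp[i][j] = fold over k of max, starting from the 0 the row was initialised with
-- (row.getD j 0 / prev.getD k 0 are exact for Python's points[i][j] / dp[i+1][k]: Pre_ guarantees the indices are in range)
def rowA (row prev : List Int) (n : Nat) : List Int :=
  (List.range n).map (fun j =>
    (List.range n).foldl (fun acc k => max acc (row.getD j 0 + prev.getD k 0 - |(j : Int) - (k : Int)|)) 0)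

-- the i-loop runs i = m-2 … 0, each row built from the already-finished row below: a foldr over points[:-1]
def maxPoints_tle (points : List (List Int)) : Int :=
  match points.dropLast.foldr (fun row prev => rowA row prev (points.headD []).length)
      (points.getLastD []) with
  | [] => 0                -- Python's max([]) raises; excluded by Pre_
  | p :: t => t.foldl max p

-- ===== PORT B =====
-- left[j] = max(left[j-1]-1, cur[j]) carried left-to-right
def scanLpass : Int → List Int → List Int
  | _, [] => []
  | c, p :: rest => max (c - 1) p :: scanLpass (max (c - 1) p) rest

def leftPass : List Int → List Int
  | [] => []
  | p :: rest => p :: scanLpass p rest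

-- right[k] = max(right[k+1]-1, cur[k]) built right-to-left (structural recursion from the right)
def rightPass : List Int → List Int
  | [] => []
  | [p] => [p]
  | p :: q :: t => max ((rightPass (q :: t)).headD 0 - 1) p :: rightPass (q :: t)

-- cur = [max(0, row[j] + max(left[j], right[j])) for j in range(n)]
def rowB (row prev : List Int) (n : Nat) : List Int :=
  (List.range n).map (fun j =>
    max 0 (row.getD j 0 + max ((leftPass prev).getD j 0) ((rightPass prev).getD j 0)))

-- cur starts as points[-1][:n]  ((…).take n is exact for xs[:n] with n ≥ 0)
def maxPoints_tle_alt (points : List (List Int)) : Int :=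
  match points.dropLast.foldr (fun row prev => rowB row prev (points.headD []).length)
      ((points.getLastD []).take (points.headD []).length) with
  | [] => 0                -- Python's max([]) raises; excluded by Pre_
  | p :: t => t.foldl max p

-- ===== PRECONDITION & SPEC =====
-- Pre_ is exactly the domain on which A returns: a nonempty grid whose first row is nonempty and whose
-- rows are all at least as wide as the first (A reads only the first len(points[0]) columns of each row;
-- anywhere outside this A raises IndexError or ValueError).
def Pre_maxPoints_tle (points : List (List Int)) : Prop :=
  points ≠ [] ∧ points.headD [] ≠ [] ∧
    ∀ row ∈ points, (points.headD []).length ≤ row.length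
instance (points : List (List Int)) : Decidable (Pre_maxPoints_tle points) := by
  unfold Pre_maxPoints_tle; infer_instance

def pvWitness_maxPoints_tle : List (List Int) := [[1, 2], [3, 4]]

def Spec_maxPoints_tle (points : List (List Int)) (out : Int) : Prop := out = maxPoints_tle_alt points
instance (points : List (List Int)) (out : Int) : Decidable (Spec_maxPoints_tle points out) := by
  unfold Spec_maxPoints_tle; infer_instance

-- ===== CLAIM (what is proved, stated in full; the proofs are below) =====
def Claim_equal_maxPoints_tle : Prop := ∀ (points : List (List Int)),
  Dom_maxPoints_tle points → Pre_maxPoints_tle points →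
  Spec_maxPoints_tle points (maxPoints_tle points)

-- ===== LEMMAS AND PROOFS =====

-- max of a nonempty list (head used as the seed)
def nmax : List Int → Int
  | [] => 0
  | p :: t => t.foldl max p

-- spec of the right-to-left pass: Rspec l = max over i of (l[i] - i)
def Rspec : List Int → Int
  | [] => 0
  | [p] => p
  | p :: q :: t => max (Rspec (q :: t) - 1) p

-- [l[0] - d, l[1] - (d+1), …]
def offs : Int → List Int → List Int
  | _, [] => []
  | d, v :: t => (v - d) :: offs (d + 1) t

lemma foldl_max_shift (l : List Int) (c d : Int) :
    l.foldl max (max c d) = max c (l.foldl max d) := by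
  induction l generalizing d with
  | nil => simp
  | cons a t ih => simp only [List.foldl_cons, max_assoc, ih]

lemma nmax_cons {l : List Int} (h : l ≠ []) (a : Int) :
    nmax (a :: l) = max a (nmax l) := by
  obtain ⟨p, t, rfl⟩ := List.exists_cons_of_ne_nil h
  simp only [nmax, List.foldl_cons]
  exact foldl_max_shift t a p

lemma nmax_append {a b : List Int} (ha : a ≠ []) (hb : b ≠ []) :
    nmax (a ++ b) = max (nmax a) (nmax b) := by
  induction a with
  | nil => exact absurd rfl ha
  | cons x xs ih =>
    rcases eq_or_ne xs [] with rfl | hxs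
    · exact nmax_cons hb x
    · have h1 : xs ++ b ≠ [] := by simp [hxs]
      rw [List.cons_append, nmax_cons h1, ih hxs, nmax_cons hxs, max_assoc]

lemma nmax_reverse {l : List Int} (h : l ≠ []) : nmax l.reverse = nmax l := by
  induction l with
  | nil => exact absurd rfl h
  | cons a t ih =>
    rcases eq_or_ne t [] with rfl | ht
    · rfl
    · have : t.reverse ≠ [] := by simpa using ht
      rw [List.reverse_cons, nmax_append this (by simp), ih ht, nmax_cons ht]
      simp [nmax, max_comm]

lemma nmax_map_sub_one {l : List Int} (h : l ≠ []) :
    nmax (l.map (fun v => v - 1)) = nmax l - 1 := by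
  induction l with
  | nil => exact absurd rfl h
  | cons a t ih =>
    rcases eq_or_ne t [] with rfl | ht
    · simp [nmax]
    · have : t.map (fun v => v - 1) ≠ [] := by simpa using ht
      rw [List.map_cons, nmax_cons this, ih ht, nmax_cons ht, max_sub_sub_right]

lemma le_nmax {l : List Int} {a : Int} (h : a ∈ l) : a ≤ nmax l := by
  induction l with
  | nil => cases h
  | cons p t ih =>
    rcases eq_or_ne t [] with rfl | ht
    · simp at h; simp [h, nmax]
    · rw [nmax_cons ht]
      rcases List.mem_cons.1 h with rfl | hmem
      · exact le_max_left _ _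
      · exact le_trans (ih hmem) (le_max_right _ _)

lemma foldl_max_add {l : List Int} (h : l ≠ []) (x c : Int) :
    l.foldl (fun a v => max a (x + v)) c = max c (x + nmax l) := by
  induction l generalizing c with
  | nil => exact absurd rfl h
  | cons v t ih =>
    rcases eq_or_ne t [] with rfl | ht
    · simp [nmax]
    · rw [List.foldl_cons, ih ht, max_assoc, nmax_cons ht, ← max_add_add_left]

lemma offs_succ (l : List Int) (d : Int) :
    offs (d + 1) l = (offs d l).map (fun v => v - 1) := by
  induction l generalizing d with
  | nil => rfl
  | cons v t ih => simp only [offs, List.map_cons, ih (d + 1)]; ring_nf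

lemma offs_length (l : List Int) (d : Int) : (offs d l).length = l.length := by
  induction l generalizing d with
  | nil => rfl
  | cons v t ih => simp [offs, ih]

lemma offs_ne_nil {l : List Int} (h : l ≠ []) (d : Int) : offs d l ≠ [] := by
  cases l with
  | nil => exact absurd rfl h
  | cons v t => simp [offs]

lemma offs_getElem (l : List Int) (d : Int) (i : Nat) (h : i < (offs d l).length) :
    (offs d l)[i] = l.getD i 0 - (d + i) := by
  induction l generalizing d i with
  | nil => rw [offs_length] at h; cases h
  | cons v t ih =>
    cases i with
    | zero => simp [offs]
    | succ i =>
      have hi : i < (offs (d + 1) t).length := by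
        rw [offs_length]
        rw [offs_length, List.length_cons] at h
        omega
      simp only [offs, List.getElem_cons_succ, List.getD_cons_succ, ih (d + 1) i hi]
      push_cast
      ring

lemma Rspec_eq_nmax {l : List Int} (h : l ≠ []) : Rspec l = nmax (offs 0 l) := by
  induction l with
  | nil => exact absurd rfl h
  | cons p t ih =>
    cases t with
    | nil => simp [Rspec, nmax, offs]
    | cons q t' =>
      have ht : (q :: t') ≠ [] := by simp
      have : offs (0 + 1) (q :: t') = (offs 0 (q :: t')).map (fun v => v - 1) := offs_succ _ 0
      rw [show (Rspec (p :: q :: t')) = max (Rspec (q :: t') - 1) p from rfl, ih ht]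
      have hne : offs (0 + 1) (q :: t') ≠ [] := offs_ne_nil ht _
      rw [show offs 0 (p :: q :: t') = (p - 0) :: offs (0 + 1) (q :: t') from rfl,
        nmax_cons hne, this, nmax_map_sub_one (offs_ne_nil ht 0)]
      simp [max_comm]

lemma Rspec_append {xs ys : List Int} (hx : xs ≠ []) (hy : ys ≠ []) :
    Rspec (xs ++ ys) = max (Rspec ys - xs.length) (Rspec xs) := by
  induction xs with
  | nil => exact absurd rfl hx
  | cons x t ih =>
    cases t with
    | nil =>
      obtain ⟨p, ys', rfl⟩ := List.exists_cons_of_ne_nil hy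
      simp [Rspec]
    | cons y t' =>
      have ht : (y :: t') ≠ [] := by simp
      have h1 : (y :: t') ++ ys ≠ [] := by simp
      obtain ⟨z, zs, hz⟩ := List.exists_cons_of_ne_nil h1
      rw [List.cons_append, show Rspec (x :: ((y :: t') ++ ys)) = max (Rspec ((y :: t') ++ ys) - 1) x by
        rw [hz]; rfl, ih ht]
      rw [show Rspec (x :: y :: t') = max (Rspec (y :: t') - 1) x from rfl]
      simp only [List.length_cons]
      push_cast
      simp only [max_def]
      split_ifs <;> omega

-- ---- characterisation of the passes ----
lemma rightPass_head {l : List Int} (h : l ≠ []) : (rightPass l).headD 0 = Rspec l := by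
  fun_induction rightPass l with
  | case1 => exact absurd rfl h
  | case2 p => rfl
  | case3 p q t ih => simp only [List.headD_cons, Rspec, ih (by simp)]

lemma rightPass_getD (l : List Int) (j : Nat) (hj : j < l.length) :
    (rightPass l).getD j 0 = Rspec (l.drop j) := by
  induction l generalizing j with
  | nil => cases hj
  | cons p t ih =>
    cases j with
    | zero =>
      cases t with
      | nil => rfl
      | cons q t' =>
        rw [show rightPass (p :: q :: t')
              = max ((rightPass (q :: t')).headD 0 - 1) p :: rightPass (q :: t') from rfl,
          List.getD_cons_zero, rightPass_head (by simp), List.drop_zero]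
        rfl
    | succ j =>
      have hjt : j < t.length := by simpa using hj
      cases t with
      | nil => cases hjt
      | cons q t' =>
        rw [show rightPass (p :: q :: t')
              = max ((rightPass (q :: t')).headD 0 - 1) p :: rightPass (q :: t') from rfl,
          List.getD_cons_succ, ih _ hjt]
        rfl

lemma scanLpass_getD (rest : List Int) (c : Int) (j : Nat) (hj : j < rest.length) :
    (scanLpass c rest).getD j 0 = Rspec ((rest.take (j + 1)).reverse ++ [c]) := by
  induction rest generalizing c j with
  | nil => cases hj
  | cons q t ih =>
    cases j with
    | zero => simp [scanLpass, Rspec]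
    | succ j =>
      have hjt : j < t.length := by simpa using hj
      rw [show scanLpass c (q :: t) = max (c - 1) q :: scanLpass (max (c - 1) q) t from rfl,
        List.getD_cons_succ, ih (max (c - 1) q) j hjt]
      have hxs : (t.take (j + 1)).reverse ≠ [] := by
        apply List.ne_nil_of_length_pos
        rw [List.length_reverse, List.length_take]
        omega
      rw [show ((q :: t).take (j + 1 + 1)).reverse ++ [c]
            = (t.take (j + 1)).reverse ++ [q, c] by simp,
        Rspec_append hxs (by simp), Rspec_append hxs (by simp)]
      have : Rspec [q, c] = Rspec [max (c - 1) q] := by simp [Rspec, max_comm]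
      rw [this]

lemma leftPass_getD (l : List Int) (j : Nat) (hj : j < l.length) :
    (leftPass l).getD j 0 = Rspec ((l.take (j + 1)).reverse) := by
  cases l with
  | nil => cases hj
  | cons p t =>
    cases j with
    | zero => rfl
    | succ j =>
      have hjt : j < t.length := by simpa using hj
      rw [show leftPass (p :: t) = p :: scanLpass p t from rfl, List.getD_cons_succ,
        scanLpass_getD t p j hjt]
      congr 1
      simp

-- ---- the pointwise decomposition:  max over all k of (prev[k] - |j-k|)  =  max left[j] right[j] ----
lemma split_map_g (prev : List Int) (j : Nat) (hj : j < prev.length) :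
    (List.range prev.length).map (fun k => prev.getD k 0 - |(j : Int) - (k : Int)|)
      = (offs 0 ((prev.take (j + 1)).reverse)).reverse ++ offs 1 (prev.drop (j + 1)) := by
  have hrevlt : (prev.take (j + 1)).reverse.length = j + 1 := by
    rw [List.length_reverse, List.length_take]; omega
  have hlen2 : (offs 0 ((prev.take (j + 1)).reverse)).length = j + 1 := by
    rw [offs_length, hrevlt]
  have hlen : (offs 0 ((prev.take (j + 1)).reverse)).reverse.length = j + 1 := by
    rw [List.length_reverse, hlen2]
  apply List.ext_getElem
  · simp [offs_length, List.length_take, List.length_drop]; omega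
  · intro i h1 h2
    have hi : i < prev.length := by simpa using h1
    rw [List.getElem_map, List.getElem_range]
    by_cases hij : i ≤ j
    · rw [List.getElem_append_left (by omega : i < (offs 0 ((prev.take (j + 1)).reverse)).reverse.length)]
      rw [List.getElem_reverse, offs_getElem _ _ _ (by rw [offs_length] at *; omega)]
      rw [hlen2]
      have e1 : j + 1 - 1 - i = j - i := by omega
      rw [e1]
      have e2 : ((prev.take (j + 1)).reverse).getD (j - i) 0 = prev.getD i 0 := by
        rw [List.getD_eq_getElem _ _ (by omega), List.getElem_reverse, List.getElem_take,
          List.getD_eq_getElem _ _ hi]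
        congr 1
        simp only [List.length_take]
        omega
      rw [e2]
      have e3 : ((j - i : Nat) : Int) = (j : Int) - i := by omega
      have e4 : |(j : Int) - (i : Int)| = (j : Int) - i := by rw [abs_of_nonneg]; omega
      rw [e3, e4]
      ring
    · rw [List.getElem_append_right (by omega : (offs 0 ((prev.take (j + 1)).reverse)).reverse.length ≤ i)]
      rw [offs_getElem _ _ _ (by rw [offs_length, List.length_drop] at *; omega)]
      rw [hlen]
      have e2 : (prev.drop (j + 1)).getD (i - (j + 1)) 0 = prev.getD i 0 := by
        rw [List.getD_eq_getElem _ _ (by rw [List.length_drop]; omega), List.getElem_drop,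
          List.getD_eq_getElem _ _ (by omega)]
        congr 1
        omega
      rw [e2]
      have e3 : ((i - (j + 1) : Nat) : Int) = (i : Int) - j - 1 := by omega
      have e4 : |(j : Int) - (i : Int)| = (i : Int) - j := by rw [abs_of_nonpos] <;> omega
      rw [e3, e4]
      ring

lemma max_LR (prev : List Int) (j : Nat) (hj : j < prev.length) :
    max (Rspec ((prev.take (j + 1)).reverse)) (Rspec (prev.drop j))
      = nmax ((List.range prev.length).map (fun k => prev.getD k 0 - |(j : Int) - (k : Int)|)) := by
  have htk : (prev.take (j + 1)).reverse ≠ [] := by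
    apply List.ne_nil_of_length_pos; rw [List.length_reverse, List.length_take]; omega
  have hdr : prev.drop j ≠ [] := by
    apply List.ne_nil_of_length_pos; rw [List.length_drop]; omega
  rw [Rspec_eq_nmax htk, Rspec_eq_nmax hdr, split_map_g prev j hj]
  have hL0 : offs 0 ((prev.take (j + 1)).reverse) ≠ [] := offs_ne_nil htk 0
  have hLrev : (offs 0 ((prev.take (j + 1)).reverse)).reverse ≠ [] := by simpa using hL0
  -- the head of offs 0 (take-rev) is prev[j] - 0
  obtain ⟨ph, pt, hpt⟩ : ∃ a t, (prev.take (j+1)).reverse = a :: t := by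
    obtain ⟨a, t, h⟩ := List.exists_cons_of_ne_nil htk; exact ⟨a, t, h⟩
  have hph : ph = prev.getD j 0 := by
    have : ((prev.take (j + 1)).reverse).getD 0 0 = ph := by rw [hpt]; rfl
    rw [← this, List.getD_eq_getElem _ _ (by simp [List.length_take]; omega),
      List.getElem_reverse, List.getElem_take, List.getD_eq_getElem _ _ hj]
    congr 1
    simp [List.length_take]
    omega
  -- prev.drop j = prev[j] :: prev.drop (j+1)
  have hdrop : prev.drop j = prev.getD j 0 :: prev.drop (j + 1) := by
    rw [List.getD_eq_getElem _ _ hj, List.drop_eq_getElem_cons hj]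
  by_cases hlast : j + 1 < prev.length
  · have hd1 : prev.drop (j + 1) ≠ [] := by
      apply List.ne_nil_of_length_pos; rw [List.length_drop]; omega
    have hoffs1 : offs 1 (prev.drop (j + 1)) ≠ [] := offs_ne_nil hd1 1
    rw [nmax_append hLrev hoffs1, nmax_reverse hL0]
    rw [hdrop, show offs 0 (prev.getD j 0 :: prev.drop (j + 1))
          = (prev.getD j 0 - 0) :: offs (0 + 1) (prev.drop (j + 1)) from rfl]
    rw [nmax_cons (by simpa using hoffs1)]
    have hmem : prev.getD j 0 - 0 ∈ offs 0 ((prev.take (j + 1)).reverse) := by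
      rw [hpt, hph]; simp [offs]
    have hle : prev.getD j 0 - 0 ≤ nmax (offs 0 ((prev.take (j + 1)).reverse)) := le_nmax hmem
    rw [show offs (0 + 1) (prev.drop (j + 1)) = offs 1 (prev.drop (j + 1)) by norm_num]
    rw [← max_assoc, max_eq_left hle]
  · have hd1 : prev.drop (j + 1) = [] := by
      apply List.drop_eq_nil_of_le; omega
    rw [hd1, show offs 1 ([] : List Int) = [] from rfl, List.append_nil, nmax_reverse hL0]
    rw [hdrop, hd1, show offs 0 [prev.getD j 0] = [prev.getD j 0 - 0] from rfl]
    have hmem : prev.getD j 0 - 0 ∈ offs 0 ((prev.take (j + 1)).reverse) := by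
      rw [hpt, hph]; simp [offs]
    have hle := le_nmax hmem
    rw [show nmax [prev.getD j 0 - 0] = prev.getD j 0 - 0 from rfl, max_eq_left hle]

-- ---- one row of A equals one row of B ----
lemma getD_take (l : List Int) (n k : Nat) (hk : k < n) : (l.take n).getD k 0 = l.getD k 0 := by
  by_cases h : k < l.length
  · rw [List.getD_eq_getElem _ _ (by rw [List.length_take]; omega), List.getElem_take,
      List.getD_eq_getElem _ _ h]
  · rw [List.getD_eq_default _ _ (by rw [List.length_take]; omega),
      List.getD_eq_default _ _ (by omega)]

lemma rowA_take (row prev : List Int) (n : Nat) :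
    rowA row prev n = rowA row (prev.take n) n := by
  unfold rowA
  apply List.map_congr_left
  intro j _
  apply PySem.List.foldl_congr_mem
  intro acc k hk
  rw [getD_take prev n k (List.mem_range.1 hk)]

lemma row_eq (row prev : List Int) (n : Nat) (hp : prev.length = n) :
    rowA row prev n = rowB row prev n := by
  unfold rowA rowB
  apply List.map_congr_left
  intro j hj
  have hjn : j < n := List.mem_range.1 hj
  have hjp : j < prev.length := by omega
  rw [leftPass_getD prev j hjp, rightPass_getD prev j hjp]
  have hmap : (List.range n).foldl
      (fun acc k => max acc (row.getD j 0 + prev.getD k 0 - |(j : Int) - (k : Int)|)) 0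
      = ((List.range n).map (fun k => prev.getD k 0 - |(j : Int) - (k : Int)|)).foldl
          (fun a v => max a (row.getD j 0 + v)) 0 := by
    rw [List.foldl_map]
    congr 1
    funext a k
    rw [add_sub_assoc]
  rw [hmap, foldl_max_add (by simp; omega) _ 0, ← hp, ← max_LR prev j hjp]

-- the bottom-up fold over the rows above the last one
lemma foldA_length (rows : List (List Int)) (init : List Int) (n : Nat) (h : rows ≠ []) :
    (rows.foldr (fun row prev => rowA row prev n) init).length = n := by
  cases rows with
  | nil => exact absurd rfl h
  | cons r rs => simp [rowA]

lemma fold_eq (rows : List (List Int)) (init : List Int) (n : Nat)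
    (hi : n ≤ init.length) (hrows : rows ≠ []) :
    rows.foldr (fun row prev => rowA row prev n) init
      = rows.foldr (fun row prev => rowB row prev n) (init.take n) := by
  induction rows with
  | nil => exact absurd rfl hrows
  | cons r rs ih =>
    cases rs with
    | nil =>
      simp only [List.foldr]
      rw [rowA_take r init n, row_eq r (init.take n) n (by rw [List.length_take]; omega)]
    | cons r2 rs2 =>
      simp only [List.foldr] at *
      rw [← ih (by simp)]
      exact row_eq r _ n (foldA_length (r2 :: rs2) init n (by simp))

-- ===== VERDICT (by name: the statement is the Claim_ definition above) =====
theorem maxPoints_tle_spec : Claim_equal_maxPoints_tle := by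
  intro points _hdom hpre
  obtain ⟨hne, hhd, hall⟩ := hpre
  unfold Spec_maxPoints_tle maxPoints_tle maxPoints_tle_alt
  cases hdp : points.dropLast with
  | nil =>
    -- a single row: both sides take the max of points[0] itself
    obtain ⟨r, rfl⟩ : ∃ r, points = [r] := by
      cases points with
      | nil => exact absurd rfl hne
      | cons p t =>
        cases t with
        | nil => exact ⟨p, rfl⟩
        | cons q t' => simp at hdp
    have h1 : [r].getLastD [] = r := rfl
    simp only [List.foldr_nil, h1, List.headD_cons, List.take_length]
  | cons r rs =>
    have hlast : points.getLastD [] ∈ points := by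
      cases points with
      | nil => exact absurd rfl hne
      | cons p t =>
        rw [List.getLastD_eq_getLast?, List.getLast?_eq_some_getLast (by simp)]
        exact List.getLast_mem _
    rw [fold_eq (r :: rs) (points.getLastD []) (points.headD []).length
      (hall _ hlast) (by simp)]
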